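-- pv_equiv track=rewrite | github.com/paguso/if767_2021_2 | src/sarr.py | lex_cmp
-- ===== SOURCE A (Python) =====
-- def lex_cmp(x, y):
--     lcp = 0
--     lx = len(x)
--     ly = len(y)
--     for i in range(min(lx,ly)):
--         if x[i] == y[i]:
--             lcp += 1
--         elif x[i] < y[i]:
--             return (-1, lcp)
--         else:
--             return (+1, lcp)
--     if lx == ly:
--         return (0, lcp)
--     elif lx < ly:
--         return (-1, lcp)
--     else:
--         return (+1, lcp)
-- ===== SOURCE B (Python) =====
-- def lex_cmp(x, y):
--     # Binary search for the common-prefix length: prefix equality is monotone,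
--     # so the largest k with x[:k] == y[:k] is found by bisection.
--     n = min(len(x), len(y))
--     lo, hi = 0, n
--     while lo < hi:
--         mid = (lo + hi + 1) // 2
--         if x[:mid] == y[:mid]:
--             lo = mid
--         else:
--             hi = mid - 1
--     lcp = lo
--     if lcp < n:
--         return (-1 if x[lcp] < y[lcp] else 1, lcp)
--     d = len(x) - len(y)
--     return ((d > 0) - (d < 0), lcp)
-- ===== Notes on version B (the rewrite author's own statement) =====
-- stated objective: alternative
-- what changed: B replaces A's single linear scan with early returns by a binary search (bisection on prefix-equality, which is monotone) that finds the common-prefix length via whole-prefix comparisons x[:mid]==y[:mid], then decides the sign with one branch; A never compares slices at all.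
import Mathlib
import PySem

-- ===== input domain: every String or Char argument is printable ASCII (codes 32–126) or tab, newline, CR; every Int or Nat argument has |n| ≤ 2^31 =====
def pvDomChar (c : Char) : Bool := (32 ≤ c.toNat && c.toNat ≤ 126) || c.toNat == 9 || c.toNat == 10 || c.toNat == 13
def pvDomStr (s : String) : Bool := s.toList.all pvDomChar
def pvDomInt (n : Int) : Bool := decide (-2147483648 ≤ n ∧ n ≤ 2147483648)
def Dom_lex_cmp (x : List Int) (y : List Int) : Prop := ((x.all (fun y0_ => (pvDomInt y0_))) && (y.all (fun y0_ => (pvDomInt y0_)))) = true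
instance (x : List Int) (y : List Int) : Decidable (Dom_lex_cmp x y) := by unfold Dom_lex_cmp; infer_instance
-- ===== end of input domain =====

-- B finds the common-prefix length by binary search on prefix equality (x[:mid]==y[:mid]) instead of A's linear scan with early returns; alternative algorithm, not faster.


-- ===== PORT A =====
-- A's 'for i in range(min(lx,ly))' loop with early returns, transcribed as a
-- recursion over the paired elements; lcp is the same accumulator, lx/ly are the
-- original lengths used by the after-loop three-way comparison.
def lexLoopA (lx ly : Int) : List Int → List Int → Int → Int × Int
  | a :: as, b :: bs, lcp =>
    if a = b then lexLoopA lx ly as bs (lcp + 1)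
    else if a < b then (-1, lcp)
    else (1, lcp)
  | _, _, lcp =>
    if lx = ly then (0, lcp)
    else if lx < ly then (-1, lcp)
    else (1, lcp)

def lex_cmp (x : List Int) (y : List Int) : Int × Int :=
  lexLoopA (x.length : Int) (y.length : Int) x y 0

-- ===== PORT B =====
-- B's 'while lo < hi' bisection on prefix equality; x[:mid] == y[:mid] is List.take.
def bisectLcp (x y : List Int) (lo hi : Nat) : Nat :=
  if _h : lo < hi then
    let mid := (lo + hi + 1) / 2
    if x.take mid = y.take mid then bisectLcp x y mid hi
    else bisectLcp x y lo (mid - 1)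
  else lo
termination_by hi - lo
decreasing_by all_goals omega

def lex_cmp_alt (x : List Int) (y : List Int) : Int × Int :=
  let n := min x.length y.length
  let lcp := bisectLcp x y 0 n
  if lcp < n then
    (if x.getD lcp 0 < y.getD lcp 0 then (-1, (lcp : Int)) else (1, (lcp : Int)))
  else
    let d : Int := (x.length : Int) - (y.length : Int)
    ((if d > 0 then (1 : Int) else 0) - (if d < 0 then (1 : Int) else 0), (lcp : Int))

-- ===== PRECONDITION & SPEC =====
def Spec_lex_cmp (x : List Int) (y : List Int) (out : Int × Int) : Prop := out = lex_cmp_alt x y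
instance (x : List Int) (y : List Int) (out : Int × Int) : Decidable (Spec_lex_cmp x y out) := by unfold Spec_lex_cmp; infer_instance

-- ===== CLAIM (what is proved, stated in full; the proofs are below) =====
def Claim_equal_lex_cmp : Prop := ∀ (x : List Int) (y : List Int), Dom_lex_cmp x y → Spec_lex_cmp x y (lex_cmp x y)

-- ===== LEMMAS AND PROOFS =====

-- the true common-prefix length, a yardstick both ports are measured against
def lcpN : List Int → List Int → Nat
  | a :: as, b :: bs => if a = b then lcpN as bs + 1 else 0
  | _, _ => 0

-- the common value both ports compute, expressed through lcpN
def cmpAt (x y : List Int) (L : Nat) : Int × Int :=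
  if L < min x.length y.length then
    (if x.getD L 0 < y.getD L 0 then -1 else 1, (L : Int))
  else
    (if x.length = y.length then 0 else if x.length < y.length then -1 else 1, (L : Int))

theorem lcpN_le (x : List Int) : ∀ y : List Int, lcpN x y ≤ min x.length y.length := by
  induction x with
  | nil => intro y; cases y <;> simp [lcpN]
  | cons a as ih =>
    intro y
    cases y with
    | nil => simp [lcpN]
    | cons b bs =>
      by_cases hab : a = b <;> simp [lcpN, hab]
      · have := ih bs; omega

theorem take_eq_iff (x : List Int) : ∀ (y : List Int) (k : Nat), k ≤ min x.length y.length →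
    (x.take k = y.take k ↔ k ≤ lcpN x y) := by
  induction x with
  | nil => intro y k hk; simp at hk; simp [hk, lcpN]
  | cons a as ih =>
    intro y k hk
    cases y with
    | nil => simp at hk; simp [hk]
    | cons b bs =>
      cases k with
      | zero => simp
      | succ m =>
        simp only [List.length_cons] at hk
        have hm : m ≤ min as.length bs.length := by omega
        by_cases hab : a = b
        · simp [List.take_succ_cons, hab, lcpN, ih bs m hm]
        · simp [List.take_succ_cons, hab, lcpN]

theorem bisectLcp_correct (x y : List Int) : ∀ (lo hi : Nat),
    lo ≤ lcpN x y → lcpN x y ≤ hi → hi ≤ min x.length y.length →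
    bisectLcp x y lo hi = lcpN x y := by
  intro lo hi
  induction hfuel : hi - lo using Nat.strong_induction_on generalizing lo hi with
  | _ d ih =>
    intro hlo hhi hn
    unfold bisectLcp
    by_cases h : lo < hi
    · simp only [dif_pos h]
      set mid := (lo + hi + 1) / 2 with hmid
      have hmid1 : lo < mid := by omega
      have hmid2 : mid ≤ hi := by omega
      by_cases htk : x.take mid = y.take mid
      · have hle : mid ≤ lcpN x y := (take_eq_iff x y mid (by omega)).mp htk
        simp only [if_pos htk]
        exact ih (hi - mid) (by omega) mid hi rfl hle hhi hn
      · have hgt : ¬ mid ≤ lcpN x y := fun hle => htk ((take_eq_iff x y mid (by omega)).mpr hle)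
        simp only [if_neg htk]
        exact ih (mid - 1 - lo) (by omega) lo (mid - 1) rfl hlo (by omega) (by omega)
    · simp only [dif_neg h]; omega

-- A's loop with accumulator k returns the same sign and an lcp shifted by k
theorem lexLoopA_shift (lx ly : Int) (x : List Int) : ∀ (y : List Int) (k : Int),
    lexLoopA lx ly x y k = ((lexLoopA lx ly x y 0).1, (lexLoopA lx ly x y 0).2 + k) := by
  induction x with
  | nil => intro y k; rcases y with _ | ⟨b, bs⟩ <;> simp [lexLoopA] <;> split_ifs <;> simp
  | cons a as ih =>
    intro y k
    rcases y with _ | ⟨b, bs⟩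
    · simp [lexLoopA]; split_ifs <;> simp
    · by_cases hab : a = b
      · simp only [lexLoopA, if_pos hab, zero_add]
        rw [ih bs (k + 1), ih bs 1]
        simp; ring
      · by_cases hlt : a < b <;> simp [lexLoopA, hab, hlt]

-- the after-loop branch only compares lx with ly, so shifting both by 1 changes nothing
theorem lexLoopA_add_one (lx ly : Int) (x : List Int) : ∀ (y : List Int) (k : Int),
    lexLoopA (lx + 1) (ly + 1) x y k = lexLoopA lx ly x y k := by
  induction x with
  | nil => intro y k; rcases y with _ | ⟨b, bs⟩ <;> simp only [lexLoopA] <;> split_ifs <;> first | rfl | (exfalso; omega)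
  | cons a as ih =>
    intro y k
    rcases y with _ | ⟨b, bs⟩
    · simp only [lexLoopA]; split_ifs <;> first | rfl | (exfalso; omega)
    · by_cases hab : a = b
      · simp only [lexLoopA, if_pos hab]; exact ih bs (k + 1)
      · by_cases hlt : a < b <;> simp [lexLoopA, hab, hlt]

theorem A_char (x : List Int) : ∀ y : List Int, lex_cmp x y = cmpAt x y (lcpN x y) := by
  induction x with
  | nil =>
    intro y
    rcases y with _ | ⟨b, bs⟩ <;>
      simp only [lex_cmp, lexLoopA, lcpN, cmpAt, List.length_nil, List.length_cons] <;>
      split_ifs <;> first | rfl | (exfalso; omega)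
  | cons a as ih =>
    intro y
    rcases y with _ | ⟨b, bs⟩
    · simp only [lex_cmp, lexLoopA, lcpN, cmpAt, List.length_cons, List.length_nil]
      split_ifs <;> first | rfl | (exfalso; omega)
    · by_cases hab : a = b
      · have L : lex_cmp (a :: as) (b :: bs)
            = ((lex_cmp as bs).1, (lex_cmp as bs).2 + 1) := by
          simp only [lex_cmp, lexLoopA, if_pos hab, zero_add, List.length_cons]
          push_cast
          rw [lexLoopA_add_one, lexLoopA_shift]
        rw [L, ih bs]
        simp only [cmpAt, lcpN, if_pos hab]
        set L0 := lcpN as bs with hL0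
        by_cases hlt : L0 < min as.length bs.length
        · have h1 : L0 + 1 < min (a :: as).length (b :: bs).length := by
            simp [List.length_cons]; omega
          simp only [if_pos h1, if_pos hlt, List.getD_cons_succ]
          split_ifs <;> simp [Prod.ext_iff]
        · have h1 : ¬ (L0 + 1 < min (a :: as).length (b :: bs).length) := by
            simp [List.length_cons]; omega
          simp only [if_neg hlt, List.length_cons,
            Nat.add_right_cancel_iff, Nat.add_lt_add_iff_right]
          split_ifs <;> simp [Prod.ext_iff] <;> push_cast <;> first | ring | rfl | omega
          
      · have hm : 0 < min (a :: as).length (b :: bs).length := by simp [List.length_cons]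
        simp only [lex_cmp, lexLoopA, if_neg hab, cmpAt, lcpN, if_pos hm, List.getD_cons_zero]
        by_cases hlt : a < b <;> simp [hlt]

theorem B_char (x y : List Int) : lex_cmp_alt x y = cmpAt x y (lcpN x y) := by
  have hb : bisectLcp x y 0 (min x.length y.length) = lcpN x y :=
    bisectLcp_correct x y 0 (min x.length y.length) (Nat.zero_le _) (lcpN_le x y) le_rfl
  simp only [lex_cmp_alt, hb, cmpAt]
  by_cases hlt : lcpN x y < min x.length y.length
  · simp only [if_pos hlt]; split_ifs <;> rfl
  · simp only [if_neg hlt]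
    split_ifs <;> simp [Prod.ext_iff] <;> omega

-- ===== VERDICT (by name: the statement is the Claim_ definition above) =====
theorem lex_cmp_spec : Claim_equal_lex_cmp := by
  intro x y _
  unfold Spec_lex_cmp
  rw [A_char, B_char]
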